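-- pv_equiv track=rewrite | github.com/zofialuther/CS8395-08-Paper1-updated | data/translated-code/pseudo-to-python/java/Successive-prime-differences.py | successivePrimes
-- ===== SOURCE A (Python) =====
-- def successivePrimes(primes, diffs):
--     results = []
--     dl = len(diffs)
--     for i in range(len(primes) - dl):
--         group = [0] * (dl + 1)
--         group[0] = primes[i]
--         for j in range(i, i + dl):
--             if primes[j + 1] - primes[j] != diffs[j - i]:
--                 break
--             group[j - i + 1] = primes[j + 1]
--         else:
--             results.append(group)
--     return results
-- ===== SOURCE B (Python) =====
-- def successivePrimes(primes, diffs):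
--     # Candidate-pruning: precompute the difference array once, then repeatedly
--     # filter the candidate start positions by one pattern element at a time.
--     n = len(primes)
--     d = [primes[k + 1] - primes[k] for k in range(n - 1)]
--     cand = list(range(n - len(diffs)))
--     for t, x in enumerate(diffs):
--         cand = [i for i in cand if d[i + t] == x]
--     return [primes[i:i + len(diffs) + 1] for i in cand]
-- ===== Notes on version B (the rewrite author's own statement) =====
-- stated objective: alternative
-- what changed: A scans each window with a nested break/else loop that fills a preallocated group list; B precomputes the prime-difference array once and prunes a candidate-position list one pattern element at a time, then materialises the surviving windows by slicing.
import Mathlib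
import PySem

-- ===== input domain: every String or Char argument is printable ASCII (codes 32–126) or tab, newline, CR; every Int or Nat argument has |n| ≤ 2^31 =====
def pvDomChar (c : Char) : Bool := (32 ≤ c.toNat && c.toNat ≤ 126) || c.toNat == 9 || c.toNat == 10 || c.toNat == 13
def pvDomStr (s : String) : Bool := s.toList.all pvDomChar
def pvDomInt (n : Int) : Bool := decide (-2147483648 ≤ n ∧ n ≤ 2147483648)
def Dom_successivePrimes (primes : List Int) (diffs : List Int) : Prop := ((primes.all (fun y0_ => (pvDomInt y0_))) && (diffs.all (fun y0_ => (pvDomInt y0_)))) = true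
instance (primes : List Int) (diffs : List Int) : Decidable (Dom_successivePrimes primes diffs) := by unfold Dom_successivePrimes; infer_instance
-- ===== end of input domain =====

-- B replaces A's per-window break/else scan (which fills a preallocated group list) with a
-- precomputed difference array and stepwise pruning of a candidate-position list (objective:
-- alternative; same worst-case cost). All list indexing in both ports is provably in range
-- for the indices actually reached, so pyGetD _ _ 0 is exact for Python's xs[k] there.

-- ===== PORT A =====
-- inner `for j in range(i, i+dl)` loop with break/else; m = remaining iterations, j = current index
def spInnerA (primes diffs : List Int) (i : Int) : Int → Nat → List Int → List Int × Bool
  | _, 0, group => (group, true)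
  | j, Nat.succ m, group =>
    if PySem.List.pyGetD primes (j + 1) 0 - PySem.List.pyGetD primes j 0 ≠ PySem.List.pyGetD diffs (j - i) 0
    then (group, false)
    else spInnerA primes diffs i (j + 1) m (group.set (j - i + 1).toNat (PySem.List.pyGetD primes (j + 1) 0))

def successivePrimes (primes : List Int) (diffs : List Int) : List (List Int) :=
  let dl : Nat := diffs.length
  (PySem.List.pyRange 0 ((primes.length : Int) - (dl : Int)) 1).foldl
    (fun results i =>
      let group := (List.replicate (dl + 1) (0 : Int)).set 0 (PySem.List.pyGetD primes i 0)
      match spInnerA primes diffs i i dl group with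
      | (g, true) => results ++ [g]
      | (_, false) => results)
    []

-- ===== PORT B =====
def successivePrimes_alt (primes : List Int) (diffs : List Int) : List (List Int) :=
  let n : Int := primes.length
  let d : List Int := (PySem.List.pyRange 0 (n - 1) 1).map
      (fun k => PySem.List.pyGetD primes (k + 1) 0 - PySem.List.pyGetD primes k 0)
  let cand0 := PySem.List.pyRange 0 (n - (diffs.length : Int)) 1
  let cand := (PySem.List.enumerate diffs).foldl
      (fun cand tx => cand.filter (fun i => PySem.List.pyGetD d (i + tx.1) 0 == tx.2)) cand0
  cand.map (fun i => PySem.List.slice primes (some i) (some (i + (diffs.length : Int) + 1)))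

-- ===== PRECONDITION & SPEC =====
def Spec_successivePrimes (primes : List Int) (diffs : List Int) (out : List (List Int)) : Prop := out = successivePrimes_alt primes diffs
instance (primes : List Int) (diffs : List Int) (out : List (List Int)) : Decidable (Spec_successivePrimes primes diffs out) := by unfold Spec_successivePrimes; infer_instance

-- ===== CLAIM (what is proved, stated in full; the proofs are below) =====
def Claim_equal_successivePrimes : Prop := ∀ (primes : List Int) (diffs : List Int), Dom_successivePrimes primes diffs → Spec_successivePrimes primes diffs (successivePrimes primes diffs)

-- ===== LEMMAS AND PROOFS =====

def pvPg (primes : List Int) (j : Int) : Int := PySem.List.pyGetD primes j 0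

def pvCond (primes diffs : List Int) (i : Int) (t : Nat) : Bool :=
  pvPg primes (i + t + 1) - pvPg primes (i + t) == PySem.List.pyGetD diffs (t : Int) 0

def pvAll (primes diffs : List Int) (i : Int) (s m : Nat) : Bool :=
  (List.range m).all (fun u => pvCond primes diffs i (s + u))

theorem pvAll_succ (primes diffs : List Int) (i : Int) (s m : Nat) :
    pvAll primes diffs i s (m + 1) = (pvCond primes diffs i s && pvAll primes diffs i (s + 1) m) := by
  have h : (fun x => pvCond primes diffs i (s + (x + 1))) = (fun u => pvCond primes diffs i (s + 1 + u)) := by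
    funext u; congr 1; omega
  simp [pvAll, List.range_succ_eq_map, List.all_map, Function.comp_def, h]

theorem spInnerA_step_eq (primes diffs : List Int) (i : Int) (s m : Nat) (g : List Int) :
    spInnerA primes diffs i (i + s) (m + 1) g =
      if pvCond primes diffs i s then
        spInnerA primes diffs i (i + ((s+1 : Nat) : Int)) m (g.set (s + 1) (pvPg primes (i + s + 1)))
      else (g, false) := by
  have e1 : i + (s:Int) - i = (s:Int) := by ring
  have e2 : ((s:Int) + 1).toNat = s + 1 := by omega
  have e3 : i + (s:Int) + 1 = i + ((s+1 : Nat) : Int) := by push_cast; ring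
  by_cases h : pvPg primes (i + s + 1) - pvPg primes (i + s) = PySem.List.pyGetD diffs (s:Int) 0
  · have hc : pvCond primes diffs i s = true := by
      simp only [pvCond, beq_iff_eq]; exact h
    simp only [pvPg] at h
    simp only [spInnerA, e1]
    rw [if_neg (not_not_intro h), if_pos hc]
    simp only [e2, pvPg, e3]
  · have hc : pvCond primes diffs i s = false := by
      simp only [pvCond, beq_eq_false_iff_ne, ne_eq]; exact h
    simp only [pvPg] at h
    simp only [spInnerA, e1]
    rw [if_pos h, hc, if_neg (by simp)]

theorem spInnerA_snd (primes diffs : List Int) (i : Int) :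
    ∀ (m s : Nat) (g : List Int),
      (spInnerA primes diffs i (i + s) m g).2 = pvAll primes diffs i s m := by
  intro m
  induction m with
  | zero => intro s g; simp [spInnerA, pvAll]
  | succ m ih =>
    intro s g
    rw [pvAll_succ, spInnerA_step_eq]
    by_cases h : pvCond primes diffs i s = true
    · rw [if_pos h, h, ih]; simp
    · rw [if_neg h]; simp [Bool.not_eq_true] at h; rw [h]; simp

theorem spInnerA_fst (primes diffs : List Int) (i : Int) :
    ∀ (m s : Nat) (g : List Int), g.length = s + m + 1 →
      pvAll primes diffs i s m = true →
      (spInnerA primes diffs i (i + s) m g).1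
        = g.take (s + 1) ++ (List.range m).map (fun u => pvPg primes (i + ((s + 1 + u : Nat) : Int))) := by
  intro m
  induction m with
  | zero =>
    intro s g hlen _
    simp [spInnerA, List.take_of_length_le, hlen]
  | succ m ih =>
    intro s g hlen hall
    rw [pvAll_succ] at hall
    obtain ⟨h1, h2⟩ := Bool.and_eq_true_iff.mp hall
    rw [spInnerA_step_eq, if_pos h1]
    have hlen' : (g.set (s + 1) (pvPg primes (i + s + 1))).length = (s + 1) + m + 1 := by
      simp [hlen]; omega
    rw [ih (s + 1) _ hlen' h2]
    have htake : (g.set (s + 1) (pvPg primes (i + s + 1))).take (s + 1 + 1)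
        = g.take (s + 1) ++ [pvPg primes (i + s + 1)] := by
      have h1 : s + 1 < g.length := by omega
      apply List.ext_getElem
      · simp; omega
      · intro k hk1 hk2
        simp only [List.getElem_take, List.getElem_set]
        rcases Nat.lt_or_ge k (s + 1) with hk | hk
        · rw [List.getElem_append_left (by simp; omega), if_neg (by omega)]
          simp
        · have hke : k = s + 1 := by simp at hk1; omega
          subst hke
          rw [if_pos rfl, List.getElem_append_right (by simp)]
          simp
    rw [htake]
    rw [List.range_succ_eq_map]
    simp only [List.map_cons, List.map_map, Function.comp_def]
    have e0 : i + ((s + 1 + 0 : Nat) : Int) = i + s + 1 := by push_cast; ring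
    have efun : (fun u => pvPg primes (i + ((s + 1 + 1 + u : Nat) : Int)))
        = (fun x => pvPg primes (i + ((s + 1 + (x + 1) : Nat) : Int))) := by
      funext u; congr 2; omega
    rw [e0, efun]
    simp

def pvChk (d : List Int) : List Int → Int → Int → Bool
  | [], _, _ => true
  | x :: ds, s, i => (PySem.List.pyGetD d (i + s) 0 == x) && pvChk d ds (s + 1) i

theorem foldB (d : List Int) :
    ∀ (ds : List Int) (s : Int) (cand : List Int),
      (PySem.List.enumerate ds s).foldl
        (fun c tx => c.filter (fun i => PySem.List.pyGetD d (i + tx.1) 0 == tx.2)) cand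
      = cand.filter (fun i => pvChk d ds s i) := by
  intro ds
  induction ds with
  | nil => intro s cand; simp [PySem.List.enumerate_nil, pvChk]
  | cons x ds ih =>
    intro s cand
    rw [PySem.List.enumerate_cons, List.foldl_cons, ih, List.filter_filter]
    apply List.filter_congr
    intro a _
    simp [pvChk, Bool.and_comm]

theorem pvChk_eq_pvAll (primes diffs : List Int) (i : Int)
    (hi0 : 0 ≤ i) (hin : i < (primes.length : Int) - (diffs.length : Int)) :
    ∀ (m s : Nat), s + m = diffs.length →
      pvChk ((PySem.List.pyRange 0 ((primes.length : Int) - 1) 1).map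
              (fun k => PySem.List.pyGetD primes (k + 1) 0 - PySem.List.pyGetD primes k 0))
            (diffs.drop s) (s : Int) i = pvAll primes diffs i s m := by
  intro m
  induction m with
  | zero =>
    intro s hs
    have : diffs.drop s = [] := by rw [Nat.add_zero] at hs; rw [hs, List.drop_length]
    rw [this]
    simp [pvChk, pvAll]
  | succ m ih =>
    intro s hs
    have hslt : s < diffs.length := by omega
    rw [List.drop_eq_getElem_cons hslt]
    have hhead : PySem.List.pyGetD ((PySem.List.pyRange 0 ((primes.length : Int) - 1) 1).map
              (fun k => PySem.List.pyGetD primes (k + 1) 0 - PySem.List.pyGetD primes k 0)) (i + s) 0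
        = pvPg primes (i + s + 1) - pvPg primes (i + s) := by
      rw [PySem.List.pyGetD_map_pyRange_of_nonneg _ _ _ _ (by omega) (by omega)]
      rfl
    have hget : diffs[s] = PySem.List.pyGetD diffs (s : Int) 0 := by
      rw [PySem.List.pyGetD_natCast, List.getD_eq_getElem _ _ hslt]
    have hcast : (s : Int) + 1 = ((s + 1 : Nat) : Int) := by push_cast; ring
    show ((PySem.List.pyGetD _ (i + s) 0 == diffs[s]) && pvChk _ (diffs.drop (s + 1)) ((s:Int) + 1) i) = _
    rw [hhead, hget, hcast, ih (s + 1) (by omega), pvAll_succ]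
    rfl

def pvWindow (primes : List Int) (i : Int) (len : Nat) : List Int :=
  (List.range len).map (fun k : Nat => pvPg primes (i + Int.ofNat k))

theorem slice_eq_window (primes : List Int) (i : Int) (dl : Nat)
    (hi0 : 0 ≤ i) (hin : i + (dl : Int) < (primes.length : Int)) :
    PySem.List.slice primes (some i) (some (i + dl + 1)) = pvWindow primes i (dl + 1) := by
  rw [PySem.List.slice_toNat primes hi0 (by omega)]
  have hd : (i + dl + 1).toNat - i.toNat = dl + 1 := by omega
  rw [hd]
  apply List.ext_getElem
  · simp [pvWindow]; omega
  · intro k hk1 hk2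
    have hk : k < dl + 1 := by simpa [pvWindow] using hk2
    have hrhs : (pvWindow primes i (dl + 1))[k] = pvPg primes (i + (k : Int)) := by
      unfold pvWindow
      rw [List.getElem_map, List.getElem_range]
      rfl
    rw [hrhs, List.getElem_take, List.getElem_drop, pvPg,
        PySem.List.pyGetD_eq_getElem _ _ (by omega) (by omega)]
    congr 1
    omega

theorem window_cons (primes : List Int) (i : Int) (len : Nat) :
    pvWindow primes i (len + 1) = pvPg primes i :: pvWindow primes (i + 1) len := by
  unfold pvWindow
  apply List.ext_getElem
  · simp
  · intro k hk1 hk2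
    cases k with
    | zero =>
      simp only [List.getElem_cons_zero, List.getElem_map, List.getElem_range]
      congr 1
      simp
    | succ k =>
      simp only [List.getElem_cons_succ, List.getElem_map, List.getElem_range]
      congr 1
      simp only [Int.ofNat_eq_natCast]
      omega

theorem stepA_eq (primes diffs : List Int) (results : List (List Int)) (i : Int) :
    (match spInnerA primes diffs i i diffs.length
        ((List.replicate (diffs.length + 1) (0 : Int)).set 0 (PySem.List.pyGetD primes i 0)) with
      | (g, true) => results ++ [g]
      | (_, false) => results)
    = if pvAll primes diffs i 0 diffs.length then
        results ++ [pvWindow primes i (diffs.length + 1)]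
      else results := by
  have hzero : i + ((0 : Nat) : Int) = i := by simp
  set g0 := (List.replicate (diffs.length + 1) (0 : Int)).set 0 (PySem.List.pyGetD primes i 0) with hg0
  have hsnd := spInnerA_snd primes diffs i diffs.length 0 g0
  rw [hzero] at hsnd
  cases hall : pvAll primes diffs i 0 diffs.length with
  | false =>
    rcases hsp : spInnerA primes diffs i i diffs.length g0 with ⟨g, b⟩
    rw [hsp, hall] at hsnd
    subst hsnd
    simp
  | true =>
    rcases hsp : spInnerA primes diffs i i diffs.length g0 with ⟨g, b⟩
    rw [hsp, hall] at hsnd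
    subst hsnd
    simp only [if_pos]
    congr 1
    have hlen : g0.length = 0 + diffs.length + 1 := by simp [hg0]
    have hfst := spInnerA_fst primes diffs i diffs.length 0 g0 hlen hall
    rw [hzero, hsp] at hfst
    simp only at hfst
    rw [hfst]
    have htake : g0.take 1 = [pvPg primes i] := by
      rw [hg0, List.replicate_succ, List.set_cons_zero, List.take_succ_cons, List.take_zero]
      rfl
    rw [htake, List.singleton_append, window_cons]
    refine congrArg (fun t => [pvPg primes i :: t]) ?_
    unfold pvWindow
    rw [List.map_inj_left]
    intro u _
    congr 1
    simp only [Int.ofNat_eq_natCast]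
    omega

theorem ab_eq (primes diffs : List Int) :
    successivePrimes primes diffs = successivePrimes_alt primes diffs := by
  have hA : successivePrimes primes diffs
      = ((PySem.List.pyRange 0 ((primes.length : Int) - (diffs.length : Int)) 1).filter
          (fun i => pvAll primes diffs i 0 diffs.length)).map
          (fun i => pvWindow primes i (diffs.length + 1)) := by
    show (PySem.List.pyRange 0 ((primes.length : Int) - (diffs.length : Int)) 1).foldl
        (fun results i =>
          match spInnerA primes diffs i i diffs.length
              ((List.replicate (diffs.length + 1) (0 : Int)).set 0 (PySem.List.pyGetD primes i 0)) with
          | (g, true) => results ++ [g]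
          | (_, false) => results) [] = _
    rw [PySem.List.foldl_congr_mem _ _
        (fun results i => if pvAll primes diffs i 0 diffs.length then
            results ++ [pvWindow primes i (diffs.length + 1)] else results) []
        (by
          intro acc x _
          exact stepA_eq primes diffs acc x)]
    rw [PySem.List.foldl_append_if]
    simp
  have hB : successivePrimes_alt primes diffs
      = ((PySem.List.pyRange 0 ((primes.length : Int) - (diffs.length : Int)) 1).filter
          (fun i => pvChk ((PySem.List.pyRange 0 ((primes.length : Int) - 1) 1).map
              (fun k => PySem.List.pyGetD primes (k + 1) 0 - PySem.List.pyGetD primes k 0)) diffs 0 i)).map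
          (fun i => PySem.List.slice primes (some i) (some (i + (diffs.length : Int) + 1))) := by
    show ((PySem.List.enumerate diffs).foldl
        (fun cand tx => cand.filter (fun i => PySem.List.pyGetD
            ((PySem.List.pyRange 0 ((primes.length : Int) - 1) 1).map
              (fun k => PySem.List.pyGetD primes (k + 1) 0 - PySem.List.pyGetD primes k 0)) (i + tx.1) 0 == tx.2))
        (PySem.List.pyRange 0 ((primes.length : Int) - (diffs.length : Int)) 1)).map
        (fun i => PySem.List.slice primes (some i) (some (i + (diffs.length : Int) + 1))) = _
    rw [foldB]
  rw [hA, hB]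
  have hfilter : (PySem.List.pyRange 0 ((primes.length : Int) - (diffs.length : Int)) 1).filter
          (fun i => pvChk ((PySem.List.pyRange 0 ((primes.length : Int) - 1) 1).map
              (fun k => PySem.List.pyGetD primes (k + 1) 0 - PySem.List.pyGetD primes k 0)) diffs 0 i)
      = (PySem.List.pyRange 0 ((primes.length : Int) - (diffs.length : Int)) 1).filter
          (fun i => pvAll primes diffs i 0 diffs.length) := by
    apply List.filter_congr
    intro i hi
    obtain ⟨hi0, hin⟩ := PySem.List.mem_pyRange_one.mp hi
    have := pvChk_eq_pvAll primes diffs i hi0 hin diffs.length 0 (by omega)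
    simpa using this
  rw [hfilter]
  apply List.map_congr_left
  intro i hi
  rw [List.mem_filter] at hi
  obtain ⟨hi0, hin⟩ := PySem.List.mem_pyRange_one.mp hi.1
  rw [slice_eq_window primes i diffs.length hi0 (by omega)]

-- ===== VERDICT (by name: the statement is the Claim_ definition above) =====
theorem successivePrimes_spec : Claim_equal_successivePrimes := by
  intro primes diffs _
  unfold Spec_successivePrimes
  exact ab_eq primes diffs
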